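-- pv_equiv track=rewrite | github.com/SeanAdams10/AdventOfCodePython | 2024/Day24/spike12_int_ops.py | swap_rules
-- ===== SOURCE A (Python) =====
-- def swap_rules(rules, key, newkey):
--     key_rule = next(rule for rule in rules if rule[3] == key)
--     key_rule_id = next(k for k,rule in enumerate(rules) if rule[3] == key)
--     newkey_rule = next(rule for rule in rules if rule[3] == newkey)
--     newkey_rule_id = next(k for k,rule in enumerate(rules) if rule[3] == newkey)
--
--
--     rules[key_rule_id] = (key_rule[0], key_rule[1], key_rule[2], newkey_rule[3])
--     rules[newkey_rule_id] = (newkey_rule[0], newkey_rule[1], newkey_rule[2], key_rule[3])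
--
--     return rules
-- ===== SOURCE B (Python) =====
-- def swap_rules(rules, key, newkey):
--     # Validate, then one pass over the rules: give the first rule that
--     # outputs `key` the output `newkey` and the first rule that outputs
--     # `newkey` the output `key`; everything else is copied through.
--     # Returns a new list.
--     outputs = {r[3] for r in rules}
--     for k in (key, newkey):
--         if k not in outputs:
--             raise ValueError(f"no rule with output {k!r}")
--     out = []
--     found_k = found_n = False
--     for r in rules:
--         if not found_k and r[3] == key:
--             out.append((r[0], r[1], r[2], newkey))
--             found_k = True
--         elif not found_n and r[3] == newkey:
--             out.append((r[0], r[1], r[2], key))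
--             found_n = True
--         else:
--             out.append(r)
--     return out
-- ===== Notes on version B (the rewrite author's own statement) =====
-- stated objective: alternative
-- what changed: Four separate next()-scans plus two in-place index assignments are replaced by an up-front presence check over the set of output names followed by one single pass that rebuilds the list, swapping the two output fields on the fly (B raises ValueError instead of StopIteration on a missing name and returns a fresh list instead of mutating the argument); Pre_ excludes exactly the inputs where no rule outputs key or none outputs newkey, on which both raise.
import Mathlib
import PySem

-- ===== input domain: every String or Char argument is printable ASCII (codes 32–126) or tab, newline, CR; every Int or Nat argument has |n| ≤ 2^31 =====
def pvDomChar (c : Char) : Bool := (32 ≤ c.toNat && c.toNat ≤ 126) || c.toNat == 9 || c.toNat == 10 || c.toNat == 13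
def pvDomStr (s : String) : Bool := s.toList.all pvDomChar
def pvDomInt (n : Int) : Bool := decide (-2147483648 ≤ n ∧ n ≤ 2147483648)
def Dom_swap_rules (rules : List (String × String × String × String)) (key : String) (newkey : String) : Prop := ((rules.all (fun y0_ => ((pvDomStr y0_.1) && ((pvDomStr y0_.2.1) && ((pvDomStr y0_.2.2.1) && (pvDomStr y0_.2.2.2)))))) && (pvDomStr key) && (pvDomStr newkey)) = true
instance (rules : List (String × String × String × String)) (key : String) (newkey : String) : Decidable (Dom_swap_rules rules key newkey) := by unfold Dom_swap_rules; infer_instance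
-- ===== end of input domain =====

-- B rebuilds the list in one pass with two found-flags instead of A's four next() scans and two
-- index assignments; equivalence is about the RETURN value (A mutates `rules` in place, B returns a fresh list).

-- ===== PORT A =====
-- next(rule for rule in rules if rule[3] == key)  → List.find?;
-- next(k for k,rule in enumerate(rules) if …)     → List.findIdx?;
-- Python raises StopIteration when any of them is missing: those inputs are excluded by Pre_ below
-- (the fallthrough branch returns rules, never reached inside Pre_).
def swap_rules (rules : List (String × String × String × String)) (key : String) (newkey : String) : List (String × String × String × String) :=
  match rules.find? (fun r => r.2.2.2 == key),
        rules.findIdx? (fun r => r.2.2.2 == key),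
        rules.find? (fun r => r.2.2.2 == newkey),
        rules.findIdx? (fun r => r.2.2.2 == newkey) with
  | some kr, some ki, some nr, some ni =>
      ((rules.set ki (kr.1, kr.2.1, kr.2.2.1, nr.2.2.2)).set ni (nr.1, nr.2.1, nr.2.2.1, kr.2.2.2))
  | _, _, _, _ => rules

-- ===== PORT B =====
-- outputs = {r[3] for r in rules} → PySem.Set.ofList; the raise ValueError branch is
-- excluded by Pre_ (the fallthrough returns rules, never reached inside Pre_).
-- swapLoop is the single for-loop of Source B, carrying its two found-flags as loop state
def swapLoop (key newkey : String) : List (String × String × String × String) → Bool → Bool → List (String × String × String × String)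
  | [], _, _ => []
  | r :: rest, fk, fn =>
    if !fk && (r.2.2.2 == key) then
      (r.1, r.2.1, r.2.2.1, newkey) :: swapLoop key newkey rest true fn
    else if !fn && (r.2.2.2 == newkey) then
      (r.1, r.2.1, r.2.2.1, key) :: swapLoop key newkey rest fk true
    else
      r :: swapLoop key newkey rest fk fn

def swap_rules_alt (rules : List (String × String × String × String)) (key : String) (newkey : String) : List (String × String × String × String) :=
  let outputs := PySem.Set.ofList (rules.map (fun r => r.2.2.2))
  if PySem.Set.contains outputs key && PySem.Set.contains outputs newkey then
    swapLoop key newkey rules false false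
  else rules

-- ===== PRECONDITION & SPEC =====
-- A raises StopIteration (and B ValueError) when no rule's output field equals key or none equals newkey; exactly those inputs are excluded.
def Pre_swap_rules (rules : List (String × String × String × String)) (key : String) (newkey : String) : Prop :=
  (∃ r ∈ rules, r.2.2.2 = key) ∧ (∃ r ∈ rules, r.2.2.2 = newkey)
instance (rules : List (String × String × String × String)) (key : String) (newkey : String) : Decidable (Pre_swap_rules rules key newkey) := by unfold Pre_swap_rules; infer_instance

def pvWitness_swap_rules : (List (String × String × String × String)) × String × String :=
  ([("a", "AND", "b", "x"), ("c", "OR", "d", "y")], "x", "y")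

def Spec_swap_rules (rules : List (String × String × String × String)) (key : String) (newkey : String) (out : List (String × String × String × String)) : Prop := out = swap_rules_alt rules key newkey
instance (rules : List (String × String × String × String)) (key : String) (newkey : String) (out : List (String × String × String × String)) : Decidable (Spec_swap_rules rules key newkey out) := by unfold Spec_swap_rules; infer_instance

-- ===== CLAIM (what is proved, stated in full; the proofs are below) =====
def Claim_equal_swap_rules : Prop := ∀ (rules : List (String × String × String × String)) (key : String) (newkey : String), Dom_swap_rules rules key newkey → Pre_swap_rules rules key newkey → Spec_swap_rules rules key newkey (swap_rules rules key newkey)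
-- ===== LEMMAS AND PROOFS =====

-- replace the 4th field of the first p-match by x
def repl (p : String × String × String × String → Bool) (x : String) : List (String × String × String × String) → List (String × String × String × String)
  | [] => []
  | r :: t => if p r then (r.1, r.2.1, r.2.2.1, x) :: t else r :: repl p x t

-- simultaneous replacement: first key-match gets newkey, first newkey-match gets key
def repl2 (key newkey : String) : List (String × String × String × String) → List (String × String × String × String)
  | [] => []
  | r :: t =>
    if r.2.2.2 == key then (r.1, r.2.1, r.2.2.1, newkey) :: repl (fun s => s.2.2.2 == newkey) key t
    else if r.2.2.2 == newkey then (r.1, r.2.1, r.2.2.1, key) :: repl (fun s => s.2.2.2 == key) newkey t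
    else r :: repl2 key newkey t

theorem swapLoop_tt (key newkey : String) (l : List (String × String × String × String)) :
    swapLoop key newkey l true true = l := by
  induction l with
  | nil => rfl
  | cons r t ih => simp [swapLoop, ih]

theorem swapLoop_tf (key newkey : String) (l : List (String × String × String × String)) :
    swapLoop key newkey l true false = repl (fun s => s.2.2.2 == newkey) key l := by
  induction l with
  | nil => rfl
  | cons r t ih =>
    by_cases h : (r.2.2.2 == newkey) = true
    · simp [swapLoop, repl, h, swapLoop_tt]
    · simp [swapLoop, repl, h, ih]

theorem swapLoop_ft (key newkey : String) (l : List (String × String × String × String)) :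
    swapLoop key newkey l false true = repl (fun s => s.2.2.2 == key) newkey l := by
  induction l with
  | nil => rfl
  | cons r t ih =>
    by_cases h : (r.2.2.2 == key) = true
    · simp [swapLoop, repl, h, swapLoop_tt]
    · simp [swapLoop, repl, h, ih]

theorem swapLoop_ff (key newkey : String) (h : (key == newkey) = false)
    (l : List (String × String × String × String)) :
    swapLoop key newkey l false false = repl2 key newkey l := by
  induction l with
  | nil => rfl
  | cons r t ih =>
    by_cases hk : (r.2.2.2 == key) = true
    · have hn : (r.2.2.2 == newkey) = false := by
        rcases eq_of_beq hk with rfl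
        simpa using h
      simp [swapLoop, repl2, hk, hn, swapLoop_tf]
    · by_cases hn : (r.2.2.2 == newkey) = true
      · simp [swapLoop, repl2, hk, hn, swapLoop_ft]
      · simp [swapLoop, repl2, hk, hn, ih]

-- with key = newkey and found_k set, the loop copies the list through
theorem swapLoop_same_tf (key : String) (l : List (String × String × String × String)) :
    swapLoop key key l true false = l := by
  induction l with
  | nil => rfl
  | cons r t ih =>
    obtain ⟨r1, r2, r3, r4⟩ := r
    by_cases h : (r4 == key) = true
    · rcases eq_of_beq h with rfl
      simp [swapLoop, swapLoop_tt]
    · simp [swapLoop, h, ih]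

-- when key = newkey, B's single pass leaves the list unchanged
theorem swapLoop_same (key : String) (l : List (String × String × String × String)) :
    swapLoop key key l false false = l := by
  induction l with
  | nil => rfl
  | cons r t ih =>
    obtain ⟨r1, r2, r3, r4⟩ := r
    by_cases h : (r4 == key) = true
    · rcases eq_of_beq h with rfl
      simp [swapLoop, swapLoop_same_tf]
    · simp [swapLoop, h, ih]

-- A's single set at the found index computes repl
theorem set_found (p : String × String × String × String → Bool) (x : String)
    (l : List (String × String × String × String)) (r : String × String × String × String) (i : Nat)
    (hf : l.find? p = some r) (hi : l.findIdx? p = some i) :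
    l.set i (r.1, r.2.1, r.2.2.1, x) = repl p x l := by
  induction l generalizing i with
  | nil => simp at hf
  | cons a t ih =>
    by_cases h : p a = true
    · simp [List.find?_cons, List.findIdx?_cons, h] at hf hi
      subst hf
      simp [← hi, repl, h]
    · simp [List.find?_cons, List.findIdx?_cons, h] at hf hi
      rcases hi with ⟨j, hj, rfl⟩
      simp [repl, h, ih j hf hj]

-- writing the found element's own fields back twice at the same index is the identity
theorem set_found_id (p : String × String × String × String → Bool) (x : String)
    (l : List (String × String × String × String)) (r : String × String × String × String) (i : Nat)
    (hf : l.find? p = some r) (hi : l.findIdx? p = some i) :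
    (l.set i (r.1, r.2.1, r.2.2.1, x)).set i (r.1, r.2.1, r.2.2.1, r.2.2.2) = l := by
  induction l generalizing i with
  | nil => simp at hf
  | cons a t ih =>
    by_cases h : p a = true
    · simp [List.find?_cons, List.findIdx?_cons, h] at hf hi
      subst hf
      simp [← hi]
    · simp [List.find?_cons, List.findIdx?_cons, h] at hf hi
      rcases hi with ⟨j, hj, rfl⟩
      simp only [List.set_cons_succ]
      rw [ih j hf hj]

-- A's two sets (both found, key ≠ newkey) compute the simultaneous replacement repl2
theorem double_set_repl2 (key newkey : String) (h : (key == newkey) = false)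
    (l : List (String × String × String × String))
    (kr nr : String × String × String × String) (ki ni : Nat)
    (hkf : l.find? (fun r => r.2.2.2 == key) = some kr)
    (hki : l.findIdx? (fun r => r.2.2.2 == key) = some ki)
    (hnf : l.find? (fun r => r.2.2.2 == newkey) = some nr)
    (hni : l.findIdx? (fun r => r.2.2.2 == newkey) = some ni) :
    (l.set ki (kr.1, kr.2.1, kr.2.2.1, nr.2.2.2)).set ni (nr.1, nr.2.1, nr.2.2.1, kr.2.2.2) =
      repl2 key newkey l := by
  have hkr : kr.2.2.2 = key := by
    have := List.find?_some hkf; exact eq_of_beq this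
  have hnr : nr.2.2.2 = newkey := by
    have := List.find?_some hnf; exact eq_of_beq this
  have hne : newkey ≠ key := by intro e; subst e; simp at h
  induction l generalizing ki ni with
  | nil => simp at hkf
  | cons a t ih =>
    by_cases hk : (a.2.2.2 == key) = true
    · have hn : (a.2.2.2 == newkey) = false := by
        rcases eq_of_beq hk with h'
        rw [h']; simpa using h
      simp [List.find?_cons, List.findIdx?_cons, hk, hn] at hkf hki hnf hni
      subst hkf
      rcases hni with ⟨j, hj, rfl⟩
      simp [← hki, repl2, hk, hkr, hnr, set_found _ _ _ _ _ hnf hj]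
    · by_cases hn : (a.2.2.2 == newkey) = true
      · simp [List.find?_cons, List.findIdx?_cons, hk, hn] at hkf hki hnf hni
        subst hnf
        rcases hki with ⟨j, hj, rfl⟩
        simp [← hni, repl2, hk, hn, hkr, hnr, hne, set_found _ _ _ _ _ hkf hj]
      · simp [List.find?_cons, List.findIdx?_cons, hk, hn] at hkf hki hnf hni
        rcases hki with ⟨j, hj, rfl⟩
        rcases hni with ⟨m, hm, rfl⟩
        simp [repl2, hk, hn, ih j m hkf hj hnf hm]

-- find?/findIdx? are some exactly when any holds
theorem any_find_some (p : String × String × String × String → Bool)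
    (l : List (String × String × String × String)) (h : l.any p = true) :
    ∃ r i, l.find? p = some r ∧ l.findIdx? p = some i := by
  induction l with
  | nil => simp at h
  | cons a t ih =>
    by_cases ha : p a = true
    · exact ⟨a, 0, by simp [List.find?_cons, ha], by simp [List.findIdx?_cons, ha]⟩
    · have ha' : p a = false := by simpa using ha
      rw [List.any_cons, ha', Bool.false_or] at h
      rcases ih h with ⟨r, i, h1, h2⟩
      exact ⟨r, i + 1, by simp [List.find?_cons, ha, h1], by simp [List.findIdx?_cons, ha, h2]⟩

-- ===== VERDICT (by name: the statement is the Claim_ definition above) =====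
theorem swap_rules_spec : Claim_equal_swap_rules := by
  intro rules key newkey _ hpre
  unfold Spec_swap_rules swap_rules swap_rules_alt
  obtain ⟨hk, hn⟩ := hpre
  have hck : PySem.Set.contains (PySem.Set.ofList (rules.map (fun r => r.2.2.2))) key = true := by
    rcases hk with ⟨r, hr, he⟩
    rw [PySem.Set.contains_iff, PySem.Set.mem_ofList]
    exact List.mem_map.2 ⟨r, hr, he⟩
  have hcn : PySem.Set.contains (PySem.Set.ofList (rules.map (fun r => r.2.2.2))) newkey = true := by
    rcases hn with ⟨r, hr, he⟩
    rw [PySem.Set.contains_iff, PySem.Set.mem_ofList]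
    exact List.mem_map.2 ⟨r, hr, he⟩
  simp only [hck, hcn, Bool.and_self, if_true]
  have hak : rules.any (fun r => r.2.2.2 == key) = true := by
    rcases hk with ⟨r, hr, he⟩; exact List.any_of_mem hr (by simp [he])
  have han : rules.any (fun r => r.2.2.2 == newkey) = true := by
    rcases hn with ⟨r, hr, he⟩; exact List.any_of_mem hr (by simp [he])
  rcases any_find_some _ _ hak with ⟨kr, ki, hkf, hki⟩
  rcases any_find_some _ _ han with ⟨nr, ni, hnf, hni⟩
  by_cases hsame : (key == newkey) = true
  · rcases eq_of_beq hsame with rfl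
    have hnr : nr = kr := by rw [hkf] at hnf; exact (Option.some.inj hnf).symm
    have hnie : ni = ki := by rw [hki] at hni; exact (Option.some.inj hni).symm
    subst hnr; subst hnie
    simp only [hkf, hki]
    rw [set_found_id _ _ _ _ _ hkf hki, swapLoop_same]
  · have h : (key == newkey) = false := by simpa using hsame
    simp only [hkf, hki, hnf, hni]
    rw [double_set_repl2 key newkey h rules kr nr ki ni hkf hki hnf hni,
        swapLoop_ff key newkey h]
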